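-- pv_equiv track=rewrite | github.com/FlyingSixtySix/senko | utils.py | split_string_at_newlines
-- ===== SOURCE A (Python) =====
-- def split_string_at_newlines(input_string, max_chunk_size=2000, split_str='\n\n') -> list[str]:
--     input_length = len(input_string)
--     chunks = []
--     start = 0
--
--     while start < input_length:
--         end = start + max_chunk_size
--
--         # Find the nearest '\n\n' before the end of the current chunk
--         if end < input_length:
--             end = input_string.rfind(split_str, start, end) + 2
--
--             # If '\n\n' was not found within the chunk, search forward for the next '\n\n'
--             if end == 1:
--                 end = input_string.find(split_str, start + max_chunk_size) + 2
--
--                 # If there's still no '\n\n', set the end to the end of the string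
--                 if end == 1:
--                     end = input_length
--
--         chunks.append(input_string[start:end])
--         start = end
--
--     return chunks
-- ===== SOURCE B (Python) =====
-- def split_string_at_newlines(input_string, max_chunk_size=2000, split_str='\n\n') -> list[str]:
--     # One pre-pass records every occurrence index of split_str; chunking then
--     # walks that sorted list with monotone pointers instead of re-scanning the
--     # string with rfind/find for every chunk.  The historical '+2' offset of the
--     # original is part of the function's contract and is kept.
--     n = len(input_string)
--     L = len(split_str)
--     positions = [i for i in range(n + 1) if input_string[i:i + L] == split_str]
--     chunks = []
--     start = 0
--     j = 0  # positions[:j] all lie before the current chunk start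
--     while start < n:
--         limit = start + max_chunk_size
--         if limit >= n:
--             end = n
--         else:
--             while j < len(positions) and positions[j] < start:
--                 j += 1
--             k = j
--             while k < len(positions) and positions[k] + L <= limit:
--                 k += 1
--             if k > j:
--                 end = positions[k - 1] + 2
--             else:
--                 m = j
--                 while m < len(positions) and positions[m] < limit:
--                     m += 1
--                 end = positions[m] + 2 if m < len(positions) else n
--         chunks.append(input_string[start:end])
--         start = end
--     return chunks
-- ===== Notes on version B (the rewrite author's own statement) =====
-- stated objective: alternative
-- what changed: B precomputes the sorted list of all split_str occurrence indices in one pass and then chunks by walking that list with monotone pointers, instead of A's per-chunk rfind backward scan and find forward scan over the string.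
-- outside the precondition, e.g. on split_string_at_newlines('\n!\r\r', -3, ''): A returns ['\n!\r', '', '\r\r'], B returns ['\n!', '\r\r']; on split_string_at_newlines('\n\nab', -2, '\n\n'): A does not finish within the time limit, B returns ['\n\n', 'ab']
import Mathlib
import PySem

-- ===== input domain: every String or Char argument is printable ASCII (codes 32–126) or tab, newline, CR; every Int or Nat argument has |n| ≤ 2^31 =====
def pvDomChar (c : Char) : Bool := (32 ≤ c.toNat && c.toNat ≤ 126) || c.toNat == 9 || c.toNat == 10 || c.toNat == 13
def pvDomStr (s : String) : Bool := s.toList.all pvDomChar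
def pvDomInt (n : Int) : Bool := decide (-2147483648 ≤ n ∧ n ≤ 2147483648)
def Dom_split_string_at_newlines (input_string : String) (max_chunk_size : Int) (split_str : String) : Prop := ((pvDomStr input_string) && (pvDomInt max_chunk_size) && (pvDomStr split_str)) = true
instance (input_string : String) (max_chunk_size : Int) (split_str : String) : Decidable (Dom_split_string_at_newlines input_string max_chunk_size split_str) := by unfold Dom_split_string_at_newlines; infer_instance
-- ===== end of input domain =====

-- B replaces A's per-chunk rfind/find string scans by one precomputed occurrence-index list
-- walked with monotone pointers; equality of the RETURN value is proved for max_chunk_size ≥ 1.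

-- ===== PORT A =====
-- A's while-loop as fuel recursion: under Pre_ every iteration moves `start` forward by at
-- least 1, so fuel = length + 1 is never exhausted on admitted inputs.
def pvLoopA (cs ts : List Char) (mcs : Int) : Nat → Int → List String
  | 0, _ => []
  | Nat.succ f, start =>
    if start < (cs.length : Int) then
      let end0 := start + mcs
      let endv : Int :=
        if end0 < (cs.length : Int) then
          let e1 := PySem.Chars.rfindFrom cs ts start (some end0) + 2
          if e1 = 1 then
            let e2 := PySem.Chars.findFrom cs ts (start + mcs) none + 2
            if e2 = 1 then (cs.length : Int) else e2
          else e1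
        else end0
      String.ofList (PySem.List.slice cs (some start) (some endv)) :: pvLoopA cs ts mcs f endv
    else []

def split_string_at_newlines (input_string : String) (max_chunk_size : Int) (split_str : String) : List String :=
  pvLoopA input_string.toList split_str.toList max_chunk_size (input_string.toList.length + 1) 0

-- ===== PORT B =====
-- Source B's match test input_string[i:i+L] == split_str
def pvOccB (cs ts : List Char) (i : Int) : Bool :=
  PySem.List.slice cs (some i) (some (i + (ts.length : Int))) == ts

-- Source B: positions = [i for i in range(n+1) if input_string[i:i+L] == split_str]
def pvPositions (cs ts : List Char) : List Int :=
  (PySem.List.pyRange 0 ((cs.length : Int) + 1) 1).filter (pvOccB cs ts)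

-- Source B: while j < len(positions) and positions[j] < start: j += 1
-- (the first Nat argument is fuel; callers pass P.length - j, which the loop never exhausts)
def pvAdvJ (P : List Int) (start : Int) : Nat → Nat → Nat
  | 0, j => j
  | Nat.succ c, j =>
    if h : j < P.length then
      (if P[j] < start then pvAdvJ P start c (j+1) else j)
    else j

-- Source B: while k < len(positions) and positions[k] + L <= limit: k += 1
def pvScanK (P : List Int) (L lim : Int) : Nat → Nat → Nat
  | 0, k => k
  | Nat.succ c, k =>
    if h : k < P.length then
      (if P[k] + L ≤ lim then pvScanK P L lim c (k+1) else k)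
    else k

-- Source B: while m < len(positions) and positions[m] < limit: m += 1
def pvScanM (P : List Int) (lim : Int) : Nat → Nat → Nat
  | 0, m => m
  | Nat.succ c, m =>
    if h : m < P.length then
      (if P[m] < lim then pvScanM P lim c (m+1) else m)
    else m

-- Source B's while loop, as fuel recursion over the same state (start, j)
def pvLoopB (cs : List Char) (P : List Int) (L mcs : Int) : Nat → Int → Nat → List String
  | 0, _, _ => []
  | Nat.succ f, start, j =>
    if start < (cs.length : Int) then
      let lim := start + mcs
      if (cs.length : Int) ≤ lim then
        String.ofList (PySem.List.slice cs (some start) (some ((cs.length : Int)))) ::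
          pvLoopB cs P L mcs f (cs.length : Int) j
      else
        let j1 := pvAdvJ P start (P.length - j) j
        let k := pvScanK P L lim (P.length - j1) j1
        let endv : Int :=
          if j1 < k then (P[k-1]?.getD 0) + 2
          else
            (if h : pvScanM P lim (P.length - j1) j1 < P.length then
               P[pvScanM P lim (P.length - j1) j1] + 2
             else (cs.length : Int))
        String.ofList (PySem.List.slice cs (some start) (some endv)) :: pvLoopB cs P L mcs f endv j1
    else []

def split_string_at_newlines_alt (input_string : String) (max_chunk_size : Int) (split_str : String) : List String :=
  pvLoopB input_string.toList (pvPositions input_string.toList split_str.toList)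
    (split_str.toList.length : Int) max_chunk_size (input_string.toList.length + 1) 0 0

-- ===== PRECONDITION & SPEC =====
-- Pre_ excludes max_chunk_size < 1: there A's backward rfind window and forward find both begin
-- before `start`, so `end` can move back to `start` and A loops forever on some inputs
-- (e.g. ("\n\nab", -2, "\n\n")), and on others returns back-tracking chunkings that are pure
-- accidents of the searches' clamping; B always walks forward and returns.
def Pre_split_string_at_newlines (input_string : String) (max_chunk_size : Int) (split_str : String) : Prop :=
  1 ≤ max_chunk_size
instance (input_string : String) (max_chunk_size : Int) (split_str : String) : Decidable (Pre_split_string_at_newlines input_string max_chunk_size split_str) := by unfold Pre_split_string_at_newlines; infer_instance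

def pvWitness_split_string_at_newlines : String × Int × String := ("a\n\nbb cc", 4, "\n\n")

def Spec_split_string_at_newlines (input_string : String) (max_chunk_size : Int) (split_str : String) (out : List String) : Prop := out = split_string_at_newlines_alt input_string max_chunk_size split_str
instance (input_string : String) (max_chunk_size : Int) (split_str : String) (out : List String) : Decidable (Spec_split_string_at_newlines input_string max_chunk_size split_str out) := by unfold Spec_split_string_at_newlines; infer_instance

-- ===== CLAIM (what is proved, stated in full; the proofs are below) =====
def Claim_equal_split_string_at_newlines : Prop := ∀ (input_string : String) (max_chunk_size : Int) (split_str : String), Dom_split_string_at_newlines input_string max_chunk_size split_str → Pre_split_string_at_newlines input_string max_chunk_size split_str → Spec_split_string_at_newlines input_string max_chunk_size split_str (split_string_at_newlines input_string max_chunk_size split_str)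

-- ===== LEMMAS AND PROOFS =====

-- Source B's slice test decides exactly the occurrence predicate "split_str starts at index i"
lemma pvOccB_iff (cs ts : List Char) (i : Int) (h0 : 0 ≤ i) :
    pvOccB cs ts i = true ↔ ts <+: cs.drop i.toNat := by
  unfold pvOccB
  rw [PySem.List.slice_toNat cs h0 (by omega)]
  have h2 : ((i + (ts.length : Int)).toNat - i.toNat) = ts.length := by omega
  rw [h2, beq_iff_eq]
  constructor
  · intro he; rw [← he]; exact List.take_prefix _ _
  · intro hp; exact (List.prefix_iff_eq_take.mp hp).symm

lemma mem_pvPositions (cs ts : List Char) (p : Int) :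
    p ∈ pvPositions cs ts ↔ 0 ≤ p ∧ p ≤ (cs.length : Int) ∧ ts <+: cs.drop p.toNat := by
  unfold pvPositions
  rw [List.mem_filter]
  constructor
  · rintro ⟨hmem, hocc⟩
    rw [PySem.List.mem_pyRange_one] at hmem
    exact ⟨hmem.1, by omega, (pvOccB_iff cs ts p hmem.1).mp hocc⟩
  · rintro ⟨h1, h2, h3⟩
    exact ⟨PySem.List.mem_pyRange_one.mpr ⟨h1, by omega⟩, (pvOccB_iff cs ts p h1).mpr h3⟩

lemma pvPositions_pairwise (cs ts : List Char) : (pvPositions cs ts).Pairwise (· < ·) :=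
  List.Pairwise.filter _ (PySem.List.pairwise_lt_pyRange_one 0 ((cs.length : Int) + 1))

lemma pvPositions_mono (cs ts : List Char) (i j : Nat) (hi : i < (pvPositions cs ts).length)
    (hj : j < (pvPositions cs ts).length) (hij : i ≤ j) :
    (pvPositions cs ts)[i] ≤ (pvPositions cs ts)[j] := by
  rcases Nat.lt_or_ge i j with h | h
  · exact le_of_lt (List.pairwise_iff_getElem.mp (pvPositions_pairwise cs ts) i j hi hj h)
  · have : i = j := by omega
    subst this; exact le_rfl

lemma pvAdvJ_spec (P : List Int) (start : Int) (c j : Nat) (hc : P.length ≤ c + j)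
    (hj : j ≤ P.length) :
    j ≤ pvAdvJ P start c j ∧ pvAdvJ P start c j ≤ P.length ∧
    (∀ i (h : i < P.length), j ≤ i → i < pvAdvJ P start c j → P[i] < start) ∧
    (∀ (h : pvAdvJ P start c j < P.length), ¬ P[pvAdvJ P start c j] < start) := by
  induction c generalizing j with
  | zero =>
    have heq : pvAdvJ P start 0 j = j := rfl
    rw [heq]
    exact ⟨le_rfl, hj, fun i h h1 h2 => absurd (lt_of_le_of_lt h1 h2) (by omega),
      fun h => absurd h (by omega)⟩
  | succ c ihd =>
    rcases Nat.lt_or_ge j P.length with hjlt | hjge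
    · by_cases hps : P[j] < start
      · have heq : pvAdvJ P start (c+1) j = pvAdvJ P start c (j+1) := by
          rw [pvAdvJ, dif_pos hjlt, if_pos hps]
        have hrec := ihd (j+1) (by omega) (by omega)
        rw [heq]
        refine ⟨by omega, hrec.2.1, ?_, hrec.2.2.2⟩
        intro i h h1 h2
        rcases Nat.lt_or_ge i (j+1) with hij | hij
        · have : i = j := by omega
          subst this; exact hps
        · exact hrec.2.2.1 i h hij h2
      · have heq : pvAdvJ P start (c+1) j = j := by
          rw [pvAdvJ, dif_pos hjlt, if_neg hps]
        rw [heq]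
        exact ⟨le_rfl, by omega, fun i h h1 h2 => absurd (lt_of_le_of_lt h1 h2) (by omega),
          fun h => hps⟩
    · have heq : pvAdvJ P start (c+1) j = j := by
        rw [pvAdvJ, dif_neg (by omega)]
      rw [heq]
      exact ⟨le_rfl, hj, fun i h h1 h2 => absurd (lt_of_le_of_lt h1 h2) (by omega),
        fun h => absurd h (by omega)⟩

lemma pvScanK_spec (P : List Int) (L lim : Int) (c j : Nat) (hc : P.length ≤ c + j)
    (hj : j ≤ P.length) :
    j ≤ pvScanK P L lim c j ∧ pvScanK P L lim c j ≤ P.length ∧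
    (∀ i (h : i < P.length), j ≤ i → i < pvScanK P L lim c j → P[i] + L ≤ lim) ∧
    (∀ (h : pvScanK P L lim c j < P.length), ¬ (P[pvScanK P L lim c j] + L ≤ lim)) := by
  induction c generalizing j with
  | zero =>
    have heq : pvScanK P L lim 0 j = j := rfl
    rw [heq]
    exact ⟨le_rfl, hj, fun i h h1 h2 => absurd (lt_of_le_of_lt h1 h2) (by omega),
      fun h => absurd h (by omega)⟩
  | succ c ihd =>
    rcases Nat.lt_or_ge j P.length with hjlt | hjge
    · by_cases hps : P[j] + L ≤ lim
      · have heq : pvScanK P L lim (c+1) j = pvScanK P L lim c (j+1) := by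
          rw [pvScanK, dif_pos hjlt, if_pos hps]
        have hrec := ihd (j+1) (by omega) (by omega)
        rw [heq]
        refine ⟨by omega, hrec.2.1, ?_, hrec.2.2.2⟩
        intro i h h1 h2
        rcases Nat.lt_or_ge i (j+1) with hij | hij
        · have : i = j := by omega
          subst this; exact hps
        · exact hrec.2.2.1 i h hij h2
      · have heq : pvScanK P L lim (c+1) j = j := by
          rw [pvScanK, dif_pos hjlt, if_neg hps]
        rw [heq]
        exact ⟨le_rfl, by omega, fun i h h1 h2 => absurd (lt_of_le_of_lt h1 h2) (by omega),
          fun h => hps⟩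
    · have heq : pvScanK P L lim (c+1) j = j := by
        rw [pvScanK, dif_neg (by omega)]
      rw [heq]
      exact ⟨le_rfl, hj, fun i h h1 h2 => absurd (lt_of_le_of_lt h1 h2) (by omega),
        fun h => absurd h (by omega)⟩

lemma pvScanM_spec (P : List Int) (lim : Int) (c j : Nat) (hc : P.length ≤ c + j)
    (hj : j ≤ P.length) :
    j ≤ pvScanM P lim c j ∧ pvScanM P lim c j ≤ P.length ∧
    (∀ i (h : i < P.length), j ≤ i → i < pvScanM P lim c j → P[i] < lim) ∧
    (∀ (h : pvScanM P lim c j < P.length), ¬ P[pvScanM P lim c j] < lim) := by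
  induction c generalizing j with
  | zero =>
    have heq : pvScanM P lim 0 j = j := rfl
    rw [heq]
    exact ⟨le_rfl, hj, fun i h h1 h2 => absurd (lt_of_le_of_lt h1 h2) (by omega),
      fun h => absurd h (by omega)⟩
  | succ c ihd =>
    rcases Nat.lt_or_ge j P.length with hjlt | hjge
    · by_cases hps : P[j] < lim
      · have heq : pvScanM P lim (c+1) j = pvScanM P lim c (j+1) := by
          rw [pvScanM, dif_pos hjlt, if_pos hps]
        have hrec := ihd (j+1) (by omega) (by omega)
        rw [heq]
        refine ⟨by omega, hrec.2.1, ?_, hrec.2.2.2⟩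
        intro i h h1 h2
        rcases Nat.lt_or_ge i (j+1) with hij | hij
        · have : i = j := by omega
          subst this; exact hps
        · exact hrec.2.2.1 i h hij h2
      · have heq : pvScanM P lim (c+1) j = j := by
          rw [pvScanM, dif_pos hjlt, if_neg hps]
        rw [heq]
        exact ⟨le_rfl, by omega, fun i h h1 h2 => absurd (lt_of_le_of_lt h1 h2) (by omega),
          fun h => hps⟩
    · have heq : pvScanM P lim (c+1) j = j := by
        rw [pvScanM, dif_neg (by omega)]
      rw [heq]
      exact ⟨le_rfl, hj, fun i h h1 h2 => absurd (lt_of_le_of_lt h1 h2) (by omega),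
        fun h => absurd h (by omega)⟩

-- A's rfind primitive scans candidate indices top-down: largest occurrence index ≤ m, else -1
lemma pvRfindGo_spec (s sub : List Char) (m : Nat) :
    (PySem.Chars.rfind.go s sub m = -1 ∧ ∀ j : Nat, j ≤ m → ¬ sub <+: s.drop j) ∨
    (∃ j : Nat, j ≤ m ∧ PySem.Chars.rfind.go s sub m = (j : Int) ∧ sub <+: s.drop j ∧
      ∀ i : Nat, j < i → i ≤ m → ¬ sub <+: s.drop i) := by
  induction m with
  | zero =>
    by_cases hp : sub <+: s
    · right
      refine ⟨0, le_rfl, ?_, by simpa using hp, fun i h1 h2 => by omega⟩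
      simp [PySem.Chars.rfind.go, List.isPrefixOf_iff_prefix, hp]
    · left
      constructor
      · simp [PySem.Chars.rfind.go, List.isPrefixOf_iff_prefix, hp]
      · intro j hj
        have : j = 0 := by omega
        subst this; simpa using hp
  | succ m ih =>
    by_cases hp : sub <+: s.drop (m+1)
    · right
      refine ⟨m+1, le_rfl, ?_, hp, fun i h1 h2 => by omega⟩
      simp [PySem.Chars.rfind.go, List.isPrefixOf_iff_prefix, hp]
    · have hstep : PySem.Chars.rfind.go s sub (m+1) = PySem.Chars.rfind.go s sub m := by
        simp [PySem.Chars.rfind.go, List.isPrefixOf_iff_prefix, hp]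
      rcases ih with ⟨h1, h2⟩ | ⟨j, hjm, hres, hocc, hmax⟩
      · left
        refine ⟨hstep ▸ h1, fun j hj => ?_⟩
        rcases Nat.lt_or_ge j (m+1) with h | h
        · exact h2 j (by omega)
        · have : j = m + 1 := by omega
          subst this; exact hp
      · right
        refine ⟨j, by omega, hstep ▸ hres, hocc, fun i h1 h2 => ?_⟩
        rcases Nat.lt_or_ge i (m+1) with h | h
        · exact hmax i h1 (by omega)
        · have : i = m + 1 := by omega
          subst this; exact hp

-- CPython rfind(sub, a, b) with in-range bounds: the largest p with a ≤ p, p + |sub| ≤ b and an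
-- occurrence at p, else -1
lemma pvRfindFrom_spec (cs ts : List Char) (a b : Int) (h0 : 0 ≤ a) (hab : a ≤ b)
    (hb : b ≤ (cs.length : Int)) :
    (PySem.Chars.rfindFrom cs ts a (some b) = -1 ∧
      ∀ p : Int, a ≤ p → p + (ts.length : Int) ≤ b → ¬ ts <+: cs.drop p.toNat) ∨
    (∃ p : Int, a ≤ p ∧ p + (ts.length : Int) ≤ b ∧ PySem.Chars.rfindFrom cs ts a (some b) = p ∧
      ts <+: cs.drop p.toNat ∧
      ∀ q : Int, p < q → q + (ts.length : Int) ≤ b → ¬ ts <+: cs.drop q.toNat) := by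
  have hmain : PySem.Chars.rfindFrom cs ts a (some b) =
      (if PySem.Chars.rfind ((cs.take b.toNat).drop a.toNat) ts = -1 then -1
       else a + PySem.Chars.rfind ((cs.take b.toNat).drop a.toNat) ts) := by
    unfold PySem.Chars.rfindFrom
    have c1 : ¬ ((cs.length : Int) < b) := by omega
    have c2 : ¬ (a < 0) := by omega
    have c3 : ¬ (b < a) := by omega
    have c4 : ¬ (b < 0) := by omega
    simp [c1, c2, c3, c4]
  set w := (cs.take b.toNat).drop a.toNat with hw
  have hwlen : w.length = b.toNat - a.toNat := by
    simp [hw]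
    omega
  have hcorr : ∀ jn : Nat, a.toNat + jn ≤ b.toNat →
      (ts <+: w.drop jn ↔ (ts <+: cs.drop (a.toNat + jn) ∧ ts.length + (a.toNat + jn) ≤ b.toNat)) := by
    intro jn hjn
    have hdrop : w.drop jn = (cs.drop (a.toNat + jn)).take (b.toNat - (a.toNat + jn)) := by
      rw [hw, List.drop_drop, List.drop_take]
    rw [hdrop, List.prefix_take_iff]
    constructor
    · rintro ⟨hpre, hlen⟩
      exact ⟨hpre, by omega⟩
    · rintro ⟨hpre, hlen⟩
      exact ⟨hpre, by omega⟩
  have hrw : PySem.Chars.rfind w ts = PySem.Chars.rfind.go w ts w.length := rfl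
  rcases pvRfindGo_spec w ts w.length with ⟨hres, hno⟩ | ⟨jn, hjm, hres, hocc, hmax⟩
  · left
    constructor
    · rw [hmain, hrw, hres]; simp
    · intro p hap hpl hpre
      have hpn : p.toNat - a.toNat ≤ w.length := by rw [hwlen]; omega
      refine hno (p.toNat - a.toNat) hpn ?_
      rw [hcorr (p.toNat - a.toNat) (by omega)]
      constructor
      · have : a.toNat + (p.toNat - a.toNat) = p.toNat := by omega
        rw [this]; exact hpre
      · omega
  · right
    refine ⟨a + (jn : Int), by omega, ?_, ?_, ?_, ?_⟩
    · have := (hcorr jn (by rw [hwlen] at hjm; omega)).mp hocc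
      omega
    · rw [hmain, hrw, hres]
      rw [if_neg (by omega)]
    · have := (hcorr jn (by rw [hwlen] at hjm; omega)).mp hocc
      have hcast : (a + (jn : Int)).toNat = a.toNat + jn := by omega
      rw [hcast]; exact this.1
    · intro q hlt hql hpre
      have hqn : jn < q.toNat - a.toNat := by omega
      have hqle : q.toNat - a.toNat ≤ w.length := by rw [hwlen]; omega
      refine hmax (q.toNat - a.toNat) hqn hqle ?_
      rw [hcorr (q.toNat - a.toNat) (by omega)]
      constructor
      · have : a.toNat + (q.toNat - a.toNat) = q.toNat := by omega
        rw [this]; exact hpre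
      · omega

-- CPython find(sub, pos): the smallest p ≥ pos with an occurrence at p, else -1
lemma pvFindFrom_spec (cs ts : List Char) (a : Int) (h0 : 0 ≤ a) (ha : a ≤ (cs.length : Int)) :
    (PySem.Chars.findFrom cs ts a none = -1 ∧
      ∀ p : Int, a ≤ p → ¬ ts <+: cs.drop p.toNat) ∨
    (∃ p : Int, a ≤ p ∧ p ≤ (cs.length : Int) ∧ PySem.Chars.findFrom cs ts a none = p ∧
      ts <+: cs.drop p.toNat ∧
      ∀ q : Int, a ≤ q → q < p → ¬ ts <+: cs.drop q.toNat) := by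
  have hub : PySem.Chars.findFrom cs ts a none = -1 ∨
      PySem.Chars.findFrom cs ts a none ≤ (cs.length : Int) := by
    have hmain : PySem.Chars.findFrom cs ts a none =
        (if PySem.Chars.find (cs.drop a.toNat) ts = -1 then -1
         else a + PySem.Chars.find (cs.drop a.toNat) ts) := by
      unfold PySem.Chars.findFrom
      have c2 : ¬ (a < 0) := by omega
      have c3 : ¬ ((cs.length : Int) < a) := by omega
      simp [c2, c3, List.take_length]
    rw [hmain]
    by_cases hfi : PySem.Chars.find (cs.drop a.toNat) ts = -1
    · left; rw [if_pos hfi]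
    · right
      rw [if_neg hfi]
      have := PySem.Chars.find_le_length (cs.drop a.toNat) ts
      rw [List.length_drop] at this
      omega
  have hcast : ((a.toNat : Nat) : Int) = a := by omega
  have hk : a.toNat ≤ cs.length := by omega
  by_cases hr : PySem.Chars.findFrom cs ts a none = -1
  · left
    refine ⟨hr, fun p hap hpre => ?_⟩
    rw [← hcast] at hr
    have hninf := (PySem.Chars.findFrom_natCast_eq_neg_one_iff cs ts a.toNat hk).mp hr
    apply hninf
    rw [← PySem.Chars.isIn_iff_infix, ← PySem.Chars.exists_prefix_drop_iff_isIn]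
    refine ⟨p.toNat - a.toNat, ?_⟩
    rw [List.drop_drop]
    have : a.toNat + (p.toNat - a.toNat) = p.toNat := by omega
    rw [this]; exact hpre
  · right
    rw [← hcast] at hr
    obtain ⟨h1, h2, h3⟩ := PySem.Chars.findFrom_natCast_spec cs ts a.toNat hk hr
    rw [hcast] at h1 h2 h3
    have hub' : PySem.Chars.findFrom cs ts a none ≤ (cs.length : Int) := by
      rcases hub with h | h
      · rw [hcast] at hr; exact absurd h hr
      · exact h
    refine ⟨PySem.Chars.findFrom cs ts a none, by omega, hub', rfl, h2, ?_⟩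
    intro q haq hqlt hpre
    have hq0 : 0 ≤ q := le_trans h0 haq
    refine h3 q.toNat (by omega) (by omega) hpre

-- the heart of the equivalence: when the chunk window ends inside the string, A's end and B's
-- end coincide, and the end always lies strictly beyond start
lemma pvEnd_eq (cs ts : List Char) (mcs start : Int) (j : Nat)
    (hm : 1 ≤ mcs) (h0 : 0 ≤ start) (hlim : start + mcs < (cs.length : Int))
    (hj : j ≤ (pvPositions cs ts).length)
    (hinv : ∀ i (h : i < (pvPositions cs ts).length), i < j → (pvPositions cs ts)[i] < start) :
    ((if PySem.Chars.rfindFrom cs ts start (some (start + mcs)) + 2 = 1 then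
        (if PySem.Chars.findFrom cs ts (start + mcs) none + 2 = 1 then ((cs.length : Int))
         else PySem.Chars.findFrom cs ts (start + mcs) none + 2)
      else PySem.Chars.rfindFrom cs ts start (some (start + mcs)) + 2)
     =
     (if pvAdvJ (pvPositions cs ts) start ((pvPositions cs ts).length - j) j <
          pvScanK (pvPositions cs ts) (ts.length : Int) (start + mcs) ((pvPositions cs ts).length - pvAdvJ (pvPositions cs ts) start ((pvPositions cs ts).length - j) j) (pvAdvJ (pvPositions cs ts) start ((pvPositions cs ts).length - j) j) then
        ((pvPositions cs ts)[pvScanK (pvPositions cs ts) (ts.length : Int) (start + mcs) ((pvPositions cs ts).length - pvAdvJ (pvPositions cs ts) start ((pvPositions cs ts).length - j) j) (pvAdvJ (pvPositions cs ts) start ((pvPositions cs ts).length - j) j) - 1]?.getD 0) + 2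
      else
        (if h : pvScanM (pvPositions cs ts) (start + mcs) ((pvPositions cs ts).length - pvAdvJ (pvPositions cs ts) start ((pvPositions cs ts).length - j) j) (pvAdvJ (pvPositions cs ts) start ((pvPositions cs ts).length - j) j) < (pvPositions cs ts).length then
           (pvPositions cs ts)[pvScanM (pvPositions cs ts) (start + mcs) ((pvPositions cs ts).length - pvAdvJ (pvPositions cs ts) start ((pvPositions cs ts).length - j) j) (pvAdvJ (pvPositions cs ts) start ((pvPositions cs ts).length - j) j)] + 2
         else ((cs.length : Int)))))
    ∧ start <
     (if pvAdvJ (pvPositions cs ts) start ((pvPositions cs ts).length - j) j <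
          pvScanK (pvPositions cs ts) (ts.length : Int) (start + mcs) ((pvPositions cs ts).length - pvAdvJ (pvPositions cs ts) start ((pvPositions cs ts).length - j) j) (pvAdvJ (pvPositions cs ts) start ((pvPositions cs ts).length - j) j) then
        ((pvPositions cs ts)[pvScanK (pvPositions cs ts) (ts.length : Int) (start + mcs) ((pvPositions cs ts).length - pvAdvJ (pvPositions cs ts) start ((pvPositions cs ts).length - j) j) (pvAdvJ (pvPositions cs ts) start ((pvPositions cs ts).length - j) j) - 1]?.getD 0) + 2
      else
        (if h : pvScanM (pvPositions cs ts) (start + mcs) ((pvPositions cs ts).length - pvAdvJ (pvPositions cs ts) start ((pvPositions cs ts).length - j) j) (pvAdvJ (pvPositions cs ts) start ((pvPositions cs ts).length - j) j) < (pvPositions cs ts).length then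
           (pvPositions cs ts)[pvScanM (pvPositions cs ts) (start + mcs) ((pvPositions cs ts).length - pvAdvJ (pvPositions cs ts) start ((pvPositions cs ts).length - j) j) (pvAdvJ (pvPositions cs ts) start ((pvPositions cs ts).length - j) j)] + 2
         else ((cs.length : Int)))) := by
  set P := pvPositions cs ts with hP
  set L := (ts.length : Int) with hL
  set lim := start + mcs with hlimdef
  obtain ⟨hj1a, hj1len, hj1mid, hj1bnd⟩ := pvAdvJ_spec P start (P.length - j) j (by omega) hj
  set j1 := pvAdvJ P start (P.length - j) j with hj1
  obtain ⟨hka, hklen, hkmid, hkbnd⟩ := pvScanK_spec P L lim (P.length - j1) j1 (by omega) hj1len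
  set k := pvScanK P L lim (P.length - j1) j1 with hk
  have inv1 : ∀ i (h : i < P.length), i < j1 → P[i] < start := by
    intro i h hi
    rcases Nat.lt_or_ge i j with hij | hij
    · exact hinv i h hij
    · exact hj1mid i h hij hi
  have hL0 : (0 : Int) ≤ L := by rw [hL]; omega
  rcases pvRfindFrom_spec cs ts start lim h0 (by omega) (le_of_lt hlim) with
    ⟨hres, hno⟩ | ⟨p, hap, hpl, hres, hocc, hmax⟩
  · -- no occurrence in the window: A falls through to find; B's k equals j1
    have hkj1 : k = j1 := by
      by_contra hne
      have hlt : j1 < k := lt_of_le_of_ne hka (fun h => hne h.symm)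
      have hj1lt : j1 < P.length := lt_of_lt_of_le hlt hklen
      have hmem := (mem_pvPositions cs ts P[j1]).mp (List.getElem_mem hj1lt)
      refine hno P[j1] (not_lt.mp (hj1bnd hj1lt)) (hkmid j1 hj1lt le_rfl hlt) hmem.2.2
    rw [hres]
    rw [if_pos (show (-1 : Int) + 2 = 1 by norm_num)]
    rw [if_neg (show ¬ j1 < k by omega)]
    obtain ⟨hma, hmlen, hmmid, hmbnd⟩ := pvScanM_spec P lim (P.length - j1) j1 (by omega) hj1len
    set m := pvScanM P lim (P.length - j1) j1 with hm'
    rcases pvFindFrom_spec cs ts lim (by omega) (le_of_lt hlim) with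
      ⟨hfres, hfno⟩ | ⟨r, hlr, hrn, hfres, hfocc, hfmin⟩
    · -- nothing after the window either: both ends are the string length
      have hmeq : ¬ m < P.length := by
        intro hmlt
        have hmem := (mem_pvPositions cs ts P[m]).mp (List.getElem_mem hmlt)
        exact hfno P[m] (not_lt.mp (hmbnd hmlt)) hmem.2.2
      rw [hfres, dif_neg hmeq]
      rw [if_pos (show (-1 : Int) + 2 = 1 by norm_num)]
      exact ⟨rfl, by omega⟩
    · -- first occurrence r at or after the window end, on both sides
      have hr0 : (0 : Int) ≤ r := le_trans (by omega) hlr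
      have hrmem : r ∈ P := (mem_pvPositions cs ts r).mpr ⟨hr0, hrn, hfocc⟩
      obtain ⟨ir, hirlen, hirval⟩ := List.mem_iff_getElem.mp hrmem
      have hirge : j1 ≤ ir := by
        by_contra hh
        have := inv1 ir hirlen (by omega)
        omega
      have hmlt : m < P.length := by
        by_contra hh
        have : P[ir] < lim := hmmid ir hirlen hirge (by omega)
        omega
      have hlimm : lim ≤ P[m] := not_lt.mp (hmbnd hmlt)
      have hmemm := (mem_pvPositions cs ts P[m]).mp (List.getElem_mem hmlt)
      have hle1 : r ≤ P[m] := by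
        by_contra hh
        exact hfmin P[m] hlimm (by omega) hmemm.2.2
      have hle2 : P[m] ≤ r := by
        have hmir : m ≤ ir := by
          by_contra hh
          have := hmmid ir hirlen hirge (by omega)
          omega
        have hmono : P[m] ≤ P[ir] := pvPositions_mono cs ts m ir hmlt hirlen hmir
        omega
      have hPm : P[m] = r := le_antisymm hle2 hle1
      rw [hfres, dif_pos hmlt, hPm]
      rw [if_neg (show ¬ r + 2 = 1 by omega)]
      exact ⟨rfl, by omega⟩
  · -- the window contains an occurrence: its maximum is P[k-1] on B's side
    have hp0 : (0 : Int) ≤ p := le_trans h0 hap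
    have hpn : p ≤ (cs.length : Int) := by omega
    have hpmem : p ∈ P := (mem_pvPositions cs ts p).mpr ⟨hp0, hpn, hocc⟩
    obtain ⟨ip, hiplen, hipval⟩ := List.mem_iff_getElem.mp hpmem
    have hipge : j1 ≤ ip := by
      by_contra hh
      have := inv1 ip hiplen (by omega)
      omega
    have hiplt : ip < k := by
      by_contra hh
      have hklt : k < P.length := lt_of_le_of_lt (not_lt.mp hh) hiplen
      have hmono : P[k] ≤ P[ip] := pvPositions_mono cs ts k ip hklt hiplen (not_lt.mp hh)
      have := hkbnd hklt
      omega
    have hj1k : j1 < k := lt_of_le_of_lt hipge hiplt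
    have hk1lt : k - 1 < P.length := by omega
    have h1 : P[k-1] + L ≤ lim := hkmid (k-1) hk1lt (by omega) (by omega)
    have hj1lt : j1 < P.length := by omega
    have h2 : start ≤ P[k-1] := by
      have hb1 := hj1bnd hj1lt
      have hmono : P[j1] ≤ P[k-1] := pvPositions_mono cs ts j1 (k-1) hj1lt hk1lt (by omega)
      omega
    have hmemk := (mem_pvPositions cs ts P[k-1]).mp (List.getElem_mem hk1lt)
    have hle1 : P[k-1] ≤ p := by
      by_contra hh
      exact hmax P[k-1] (by omega) h1 hmemk.2.2
    have hle2 : p ≤ P[k-1] := by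
      have hmono : P[ip] ≤ P[k-1] := pvPositions_mono cs ts ip (k-1) hiplen hk1lt (by omega)
      omega
    have hPk1 : P[k-1] = p := le_antisymm hle1 hle2
    rw [hres, if_neg (show ¬ p + 2 = 1 by omega), if_pos hj1k,
      List.getElem?_eq_getElem hk1lt, Option.getD_some, hPk1]
    exact ⟨rfl, by omega⟩

lemma pvLoopA_nil (cs ts : List Char) (mcs : Int) (f : Nat) (start : Int)
    (h : (cs.length : Int) ≤ start) : pvLoopA cs ts mcs f start = [] := by
  cases f <;> simp [pvLoopA, not_lt.mpr h]

lemma pvLoopB_nil (cs : List Char) (P : List Int) (L mcs : Int) (f : Nat) (start : Int) (j : Nat)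
    (h : (cs.length : Int) ≤ start) : pvLoopB cs P L mcs f start j = [] := by
  cases f <;> simp [pvLoopB, not_lt.mpr h]

lemma pvSlice_clamp (cs : List Char) (a b : Int) (h0 : 0 ≤ a) (hab : a ≤ b)
    (hb : (cs.length : Int) ≤ b) :
    PySem.List.slice cs (some a) (some b) = PySem.List.slice cs (some a) (some (cs.length : Int)) := by
  rw [PySem.List.slice_toNat cs h0 (by omega), PySem.List.slice_toNat cs h0 (by omega)]
  have hlen1 : (List.drop a.toNat cs).length ≤ b.toNat - a.toNat := by
    rw [List.length_drop]; omega
  have hlen2 : (List.drop a.toNat cs).length ≤ ((cs.length : Int)).toNat - a.toNat := by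
    rw [List.length_drop]; omega
  rw [List.take_of_length_le hlen1, List.take_of_length_le hlen2]

lemma pvLoop_eq (cs ts : List Char) (mcs : Int) (hm : 1 ≤ mcs) (f : Nat) (start : Int) (j : Nat)
    (h0 : 0 ≤ start) (hj : j ≤ (pvPositions cs ts).length)
    (hinv : ∀ i (h : i < (pvPositions cs ts).length), i < j → (pvPositions cs ts)[i] < start) :
    pvLoopA cs ts mcs f start =
      pvLoopB cs (pvPositions cs ts) (ts.length : Int) mcs f start j := by
  induction f generalizing start j with
  | zero => rfl
  | succ f ih =>
    by_cases hlt : start < (cs.length : Int)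
    · by_cases hbig : (cs.length : Int) ≤ start + mcs
      · rw [pvLoopA, pvLoopB]
        simp only [if_pos hlt, if_neg (not_lt.mpr hbig), if_pos hbig]
        rw [pvSlice_clamp cs start (start + mcs) h0 (by omega) hbig]
        rw [pvLoopA_nil cs ts mcs f (start + mcs) hbig,
          pvLoopB_nil cs (pvPositions cs ts) (ts.length : Int) mcs f (cs.length : Int) j le_rfl]
      · rw [not_le] at hbig
        have hend := pvEnd_eq cs ts mcs start j hm h0 hbig hj hinv
        obtain ⟨hj1a, hj1len, hj1mid, hj1bnd⟩ :=
          pvAdvJ_spec (pvPositions cs ts) start ((pvPositions cs ts).length - j) j (by omega) hj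
        rw [pvLoopA, pvLoopB]
        simp only [if_pos hlt, if_pos hbig, if_neg (not_le.mpr hbig)]
        rw [hend.1]
        congr 1
        apply ih
        · omega
        · exact hj1len
        · intro i h hi
          rcases Nat.lt_or_ge i j with hij | hij
          · have := hinv i h hij
            omega
          · have := hj1mid i h hij hi
            omega
    · rw [pvLoopA, pvLoopB]
      simp [hlt]

-- ===== VERDICT (by name: the statement is the Claim_ definition above) =====
theorem split_string_at_newlines_spec : Claim_equal_split_string_at_newlines := by
  intro s mcs t _ hpre
  unfold Spec_split_string_at_newlines split_string_at_newlines split_string_at_newlines_alt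
  exact pvLoop_eq s.toList t.toList mcs hpre _ 0 0 le_rfl (Nat.zero_le _) (by omega)
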